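-- pv_equiv track=rewrite | github.com/dhanus22/Pentagon | Programming/Arrays/secmax.py | secmax
-- ===== SOURCE A (Python) =====
-- def secmax(arr):
--     max = ((-2**31)-1)
--     maxind = -1
--     sec = ((-2**31)-1)
--     secind = -1
--     for i in range(0, len(arr)):
--         if max < arr[i]:
--             sec = max
--             secind = maxind
--             max = arr[i]
--             maxind = i
--         elif (max != arr[i] and sec < arr[i]):
--             sec = arr[i]
--             secind = i
--     return [max, maxind, sec, secind]
-- ===== SOURCE B (Python) =====
-- def secmax(arr):
--     m = (-2**31) - 1
--     mi = -1
--     for i, x in enumerate(arr):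
--         if m < x:
--             m, mi = x, i
--     s = (-2**31) - 1
--     si = -1
--     for i, x in enumerate(arr):
--         if x != m and s < x:
--             s, si = x, i
--     return [m, mi, s, si]
-- ===== Notes on version B (the rewrite author's own statement) =====
-- stated objective: simpler
-- what changed: Replaces A's single combined scan with a quadruple state (max promotion into second-max inside one loop) by two independent linear scans: one for the max with its first index, one for the largest value different from the max with its first index.
import Mathlib
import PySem

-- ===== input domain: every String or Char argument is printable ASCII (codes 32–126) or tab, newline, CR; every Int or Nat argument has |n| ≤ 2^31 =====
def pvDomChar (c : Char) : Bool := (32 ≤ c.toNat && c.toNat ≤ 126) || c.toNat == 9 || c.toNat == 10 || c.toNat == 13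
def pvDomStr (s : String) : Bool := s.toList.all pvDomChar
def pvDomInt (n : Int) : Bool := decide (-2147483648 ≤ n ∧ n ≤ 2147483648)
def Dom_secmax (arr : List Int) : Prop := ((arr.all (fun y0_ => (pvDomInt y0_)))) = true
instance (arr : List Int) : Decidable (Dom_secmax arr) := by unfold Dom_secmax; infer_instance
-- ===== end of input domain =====

-- B replaces A's single combined scan (quadruple state with max-promotion into second-max)
-- by two independent linear scans: objective 'simpler'; equivalence proved on all inputs.


-- ===== PORT A =====
-- the for-loop of A: one pass, state (max, maxind, sec, secind), index i
def secmaxGo (arr : List Int) (i : Int) (mx mi sec si : Int) : List Int :=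
  match arr with
  | [] => [mx, mi, sec, si]
  | x :: t =>
    if mx < x then secmaxGo t (i + 1) x i mx mi
    else if mx ≠ x ∧ sec < x then secmaxGo t (i + 1) mx mi x i
    else secmaxGo t (i + 1) mx mi sec si

def secmax (arr : List Int) : List Int :=
  secmaxGo arr 0 (-2 ^ 31 - 1) (-1) (-2 ^ 31 - 1) (-1)

-- ===== PORT B =====
-- first scan of B: max value with its first index
def altMax (arr : List Int) (i : Int) (st : Int × Int) : Int × Int :=
  match arr with
  | [] => st
  | x :: t => altMax t (i + 1) (if st.1 < x then (x, i) else st)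

-- second scan of B: largest value different from M, with its first index
def altSec (M : Int) (arr : List Int) (i : Int) (st : Int × Int) : Int × Int :=
  match arr with
  | [] => st
  | x :: t => altSec M t (i + 1) (if x ≠ M ∧ st.1 < x then (x, i) else st)

def secmax_alt (arr : List Int) : List Int :=
  let p := altMax arr 0 (-2 ^ 31 - 1, -1)
  let q := altSec p.1 arr 0 (-2 ^ 31 - 1, -1)
  [p.1, p.2, q.1, q.2]

-- ===== PRECONDITION & SPEC =====
def Spec_secmax (arr : List Int) (out : List Int) : Prop := out = secmax_alt arr
instance (arr : List Int) (out : List Int) : Decidable (Spec_secmax arr out) := by unfold Spec_secmax; infer_instance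

-- ===== CLAIM (what is proved, stated in full; the proofs are below) =====
def Claim_equal_secmax : Prop := ∀ (arr : List Int), Dom_secmax arr → Spec_secmax arr (secmax arr)

-- ===== LEMMAS AND PROOFS =====

-- the running max of the first scan never decreases
theorem altMax_fst_mono : ∀ (t : List Int) (i : Int) (st : Int × Int), st.1 ≤ (altMax t i st).1 := by
  intro t
  induction t with
  | nil => intro i st; simp [altMax]
  | cons x r ih =>
    intro i st
    simp only [altMax]
    by_cases h : st.1 < x
    · simp only [h, if_pos]
      exact le_trans (le_of_lt h) (ih (i + 1) (x, i))
    · simp only [h, if_neg, not_false_iff]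
      exact ih (i + 1) st

-- if the first scan does not increase the max, it leaves the whole state unchanged
theorem altMax_stay : ∀ (t : List Int) (i : Int) (st : Int × Int),
    (altMax t i st).1 = st.1 → altMax t i st = st := by
  intro t
  induction t with
  | nil => intro i st _; rfl
  | cons x r ih =>
    intro i st h
    simp only [altMax] at h ⊢
    by_cases hx : st.1 < x
    · exfalso
      rw [if_pos hx] at h
      have := altMax_fst_mono r (i + 1) (x, i)
      simp only [h] at this
      omega
    · rw [if_neg hx] at h ⊢
      exact ih (i + 1) st h

-- main invariant: A's combined scan equals B's two scans, for any starting state.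
-- If the max does not change over t, A's second components evolve like B's second scan
-- started from (sec, si); if it does change, like B's second scan started from (mx, mi)
-- (A promotes the old max into the second-max slot at the moment of increase).
theorem main_inv : ∀ (t : List Int) (i mx mi sec si : Int),
    secmaxGo t i mx mi sec si =
      (let p := altMax t i (mx, mi)
       if p.1 = mx then
         [mx, mi, (altSec mx t i (sec, si)).1, (altSec mx t i (sec, si)).2]
       else
         [p.1, p.2, (altSec p.1 t i (mx, mi)).1, (altSec p.1 t i (mx, mi)).2]) := by
  intro t
  induction t with
  | nil =>
    intro i mx mi sec si
    simp [secmaxGo, altMax, altSec]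
  | cons x r ih =>
    intro i mx mi sec si
    by_cases h1 : mx < x
    · -- A promotes: new state (x, i, mx, mi)
      have hM : ¬ (altMax r (i + 1) (x, i)).1 = mx := by
        have := altMax_fst_mono r (i + 1) (x, i)
        simp only at this
        omega
      simp only [secmaxGo, altMax, altSec, if_pos h1]
      rw [ih (i + 1) x i mx mi]
      simp only
      by_cases h2 : (altMax r (i + 1) (x, i)).1 = x
      · have hstay := altMax_stay r (i + 1) (x, i) h2
        rw [if_pos h2, if_neg hM, hstay]
        rw [if_neg (by simp)]
      · rw [if_neg h2, if_neg hM]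
        have hlt : x < (altMax r (i + 1) (x, i)).1 := by
          have := altMax_fst_mono r (i + 1) (x, i)
          simp only at this
          omega
        rw [if_pos ⟨by omega, h1⟩]
    · -- no promotion at the head
      have hstep : altMax (x :: r) i (mx, mi) = altMax r (i + 1) (mx, mi) := by
        simp only [altMax]
        rw [if_neg (by simpa using h1)]
      by_cases h2 : mx ≠ x ∧ sec < x
      · -- A updates the second max
        simp only [secmaxGo, if_neg h1, if_pos h2]
        rw [ih (i + 1) mx mi x i, hstep]
        simp only
        by_cases h3 : (altMax r (i + 1) (mx, mi)).1 = mx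
        · rw [if_pos h3, if_pos h3]
          simp only [altSec]
          rw [if_pos ⟨fun e => h2.1 e.symm, h2.2⟩]
        · rw [if_neg h3, if_neg h3]
          have hlt : mx < (altMax r (i + 1) (mx, mi)).1 := by
            have := altMax_fst_mono r (i + 1) (mx, mi)
            simp only at this
            omega
          simp only [altSec]
          rw [if_neg (by push Not; intro _; omega)]
      · -- A leaves the state unchanged
        simp only [secmaxGo, if_neg h1, if_neg h2]
        rw [ih (i + 1) mx mi sec si, hstep]
        simp only
        by_cases h3 : (altMax r (i + 1) (mx, mi)).1 = mx
        · rw [if_pos h3, if_pos h3]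
          simp only [altSec]
          by_cases hxm : x = mx
          · rw [if_neg (by simp [hxm])]
          · rw [if_neg (by push Not; intro _; push Not at h2; omega)]
        · rw [if_neg h3, if_neg h3]
          have hlt : mx < (altMax r (i + 1) (mx, mi)).1 := by
            have := altMax_fst_mono r (i + 1) (mx, mi)
            simp only at this
            omega
          simp only [altSec]
          rw [if_neg (by push Not; intro _; omega)]

-- ===== VERDICT (by name: the statement is the Claim_ definition above) =====
theorem secmax_spec : Claim_equal_secmax := by
  intro arr _
  unfold Spec_secmax secmax secmax_alt
  rw [main_inv]
  simp only
  by_cases h : (altMax arr 0 (-2 ^ 31 - 1, -1)).1 = -2 ^ 31 - 1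
  · have hstay := altMax_stay arr 0 (-2 ^ 31 - 1, -1) h
    rw [if_pos h, hstay]
  · rw [if_neg h]
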